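-- pv_equiv track=rewrite | github.com/hasiddiqui2/NLP-Final-Project | ml_model.py | detect_word_score
-- ===== SOURCE A (Python) =====
-- def detect_word_score(text):
--     positive = ['amazing', 'awesome', 'great', 'fantastic', 'excellent','fabulous',
--                 'wonderful', 'terrific','impressive','superb','spectacular','phenomenal',
--                 'incredible', 'outstanding','marvelous','perfect','splendid', 'delightful',
--                     'lovely','fantabulous']
--
--     negative = ['terrible', 'awful','horrible', 'disappointing','pathetic','dismal','poor', 'bad',
--                 'gross', 'unpleasant','mediocre','subpar', 'dreadful', 'unfortunate','miserable',
--                 'lousy', 'unsatisfactory','inferior','atrocious','abysmal']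
--
--     score = 0
--
--     text_words = text.lower().split()
--     for word in text_words:
--         if word in positive:
--             score += 1
--         if word in negative:
--             score -= 1
--     return score
-- ===== SOURCE B (Python) =====
-- POSITIVE_WORDS = ('amazing awesome great fantastic excellent fabulous wonderful '
--                   'terrific impressive superb spectacular phenomenal incredible '
--                   'outstanding marvelous perfect splendid delightful lovely fantabulous')
--
-- NEGATIVE_WORDS = ('terrible awful horrible disappointing pathetic dismal poor bad '
--                   'gross unpleasant mediocre subpar dreadful unfortunate miserable '
--                   'lousy unsatisfactory inferior atrocious abysmal')
--
--
-- def detect_word_score(text):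
--     # signed vocabulary: each word paired with its weight (+1 / -1)
--     vocab = [(w, 1) for w in POSITIVE_WORDS.split()] + \
--             [(w, -1) for w in NEGATIVE_WORDS.split()]
--
--     # frequency table of the text's words, built once
--     counts = {}
--     for w in text.lower().split():
--         counts[w] = counts.get(w, 0) + 1
--
--     # score = weighted sum of counts over the fixed vocabulary
--     score = 0
--     for w, k in vocab:
--         score += k * counts.get(w, 0)
--     return score
-- ===== Notes on version B (the rewrite author's own statement) =====
-- stated objective: alternative
-- what changed: B builds a word-frequency dict from the text once and then folds over a single signed vocabulary list (word, +1/-1) summing weight*count, instead of scanning both vocabulary lists for every word of the text.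
import Mathlib
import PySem

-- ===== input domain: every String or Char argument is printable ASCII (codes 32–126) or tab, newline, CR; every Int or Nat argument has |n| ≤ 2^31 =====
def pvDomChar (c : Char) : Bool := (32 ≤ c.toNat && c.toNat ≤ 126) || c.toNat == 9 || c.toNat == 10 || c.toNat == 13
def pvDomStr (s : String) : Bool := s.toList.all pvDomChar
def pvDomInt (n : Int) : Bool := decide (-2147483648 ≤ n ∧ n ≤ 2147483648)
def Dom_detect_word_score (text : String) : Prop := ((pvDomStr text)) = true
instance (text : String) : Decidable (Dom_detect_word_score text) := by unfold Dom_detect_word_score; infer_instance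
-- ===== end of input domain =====

-- B builds a word-frequency dict from the text once and folds over a single signed vocabulary
-- (word, +1/-1) summing weight*count, instead of scanning both vocabulary lists per text word; objective: alternative.


-- ===== PORT A =====
def pvPositive : List String :=
  ["amazing", "awesome", "great", "fantastic", "excellent", "fabulous",
   "wonderful", "terrific", "impressive", "superb", "spectacular", "phenomenal",
   "incredible", "outstanding", "marvelous", "perfect", "splendid", "delightful",
   "lovely", "fantabulous"]

def pvNegative : List String :=
  ["terrible", "awful", "horrible", "disappointing", "pathetic", "dismal", "poor", "bad",
   "gross", "unpleasant", "mediocre", "subpar", "dreadful", "unfortunate", "miserable",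
   "lousy", "unsatisfactory", "inferior", "atrocious", "abysmal"]

def detect_word_score (text : String) : Int :=
  (PySem.Str.split₀ (PySem.Str.lower text)).foldl
    (fun score word =>
      let score := if pvPositive.contains word then score + 1 else score
      if pvNegative.contains word then score - 1 else score) 0

-- ===== PORT B =====
def pvPosStr : String :=
  "amazing awesome great fantastic excellent fabulous wonderful terrific impressive superb spectacular phenomenal incredible outstanding marvelous perfect splendid delightful lovely fantabulous"

def pvNegStr : String :=
  "terrible awful horrible disappointing pathetic dismal poor bad gross unpleasant mediocre subpar dreadful unfortunate miserable lousy unsatisfactory inferior atrocious abysmal"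

def detect_word_score_alt (text : String) : Int :=
  let vocab : List (String × Int) :=
    (PySem.Str.split₀ pvPosStr).map (fun w => (w, (1 : Int)))
      ++ (PySem.Str.split₀ pvNegStr).map (fun w => (w, (-1 : Int)))
  let counts : PySem.Dict String Int :=
    (PySem.Str.split₀ (PySem.Str.lower text)).foldl
      (fun d w => d.insert w (d.getD w 0 + 1)) PySem.Dict.empty
  vocab.foldl (fun s p => s + p.2 * counts.getD p.1 0) 0

-- ===== PRECONDITION & SPEC =====
def Spec_detect_word_score (text : String) (out : Int) : Prop := out = detect_word_score_alt text
instance (text : String) (out : Int) : Decidable (Spec_detect_word_score text out) := by unfold Spec_detect_word_score; infer_instance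

-- ===== CLAIM =====
def Claim_equal_detect_word_score : Prop := ∀ (text : String), Dom_detect_word_score text → Spec_detect_word_score text (detect_word_score text)

-- ===== LEMMAS AND PROOFS =====

-- A's fold from any accumulator: counts positive hits minus negative hits
theorem pvA_fold (ws : List String) (a : Int) :
    ws.foldl (fun score word =>
      let score := if pvPositive.contains word then score + 1 else score
      if pvNegative.contains word then score - 1 else score) a
    = a + (ws.countP (fun w => pvPositive.contains w) : Int)
        - (ws.countP (fun w => pvNegative.contains w) : Int) := by
  induction ws generalizing a with
  | nil => simp
  | cons w rest ih =>
    simp only [List.foldl_cons, List.countP_cons, ih]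
    by_cases hp : w ∈ pvPositive <;> by_cases hn : w ∈ pvNegative <;>
      simp [hp, hn, List.contains_eq_mem] <;> ring

-- countP of a disjunction of disjoint predicates splits into a sum
theorem pvCountP_or {α : Type} (p q : α → Bool) (h : ∀ w, ¬(p w = true ∧ q w = true))
    (ws : List α) :
    ws.countP (fun w => p w || q w) = ws.countP p + ws.countP q := by
  induction ws with
  | nil => simp
  | cons w ws ih =>
    simp only [List.countP_cons, ih]
    by_cases hp : p w = true <;> by_cases hq : q w = true
    · exact absurd ⟨hp, hq⟩ (h w)
    all_goals simp [hp, hq] <;> omega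

-- counting each vocabulary word in ws and summing = counting ws's words that lie in the vocabulary
theorem pvCount_split (ws : List String) (v : String) (rest : List String) (hv : v ∉ rest) :
    (ws.count v : Int) + (ws.countP (fun w => rest.contains w) : Int)
      = (ws.countP (fun w => (v :: rest).contains w) : Int) := by
  have hcong : ws.countP (fun w => (v :: rest).contains w)
      = ws.countP (fun w => (w == v) || rest.contains w) := by
    apply List.countP_congr
    intro w _
    simp
  have hdisj : ∀ w : String, ¬((w == v) = true ∧ rest.contains w = true) := by
    intro w hcontra
    obtain ⟨h1, h2⟩ := hcontra
    have hwv : w = v := by simpa using h1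
    subst hwv
    exact hv (by simpa [List.contains_eq_mem] using h2)
  have hcount : ws.count v = ws.countP (fun w => w == v) := List.count_eq_countP
  rw [hcong, pvCountP_or _ _ hdisj, hcount]
  push_cast
  ring

-- B's signed fold over a weighted vocabulary splits word by word
theorem pvSigned_fold (vocab : List (String × Int)) (c : String → Int) (a : Int) :
    vocab.foldl (fun s p => s + p.2 * c p.1) a
      = a + (vocab.map (fun p => p.2 * c p.1)).sum := by
  induction vocab generalizing a with
  | nil => simp
  | cons v rest ih => simp only [List.foldl_cons, List.map_cons, List.sum_cons, ih]; ring

-- summed counts over a duplicate-free vocabulary = countP over membership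
theorem pvSum_counts (vocab : List String) (hn : vocab.Nodup) (ws : List String) :
    ((vocab.map (fun v => (ws.count v : Int))).sum)
      = (ws.countP (fun w => vocab.contains w) : Int) := by
  induction vocab with
  | nil => simp
  | cons v rest ih =>
    have hvr : v ∉ rest := (List.nodup_cons.mp hn).1
    simp only [List.map_cons, List.sum_cons, ih (List.nodup_cons.mp hn).2]
    exact pvCount_split ws v rest hvr

-- the -1-weighted half of B's sum is the negated sum of counts
theorem pvSum_neg (xs : List String) (c : String → Int) :
    (xs.map (fun w => (-1 : Int) * c w)).sum = -((xs.map (fun w => c w)).sum) := by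
  induction xs with
  | nil => simp
  | cons x xs ih => simp only [List.map_cons, List.sum_cons, ih]; ring

set_option maxRecDepth 8000 in
theorem pvPos_split : PySem.Str.split₀ pvPosStr = pvPositive := by decide

set_option maxRecDepth 8000 in
theorem pvNeg_split : PySem.Str.split₀ pvNegStr = pvNegative := by decide
theorem pvPositive_nodup : pvPositive.Nodup := by decide
theorem pvNegative_nodup : pvNegative.Nodup := by decide

-- ===== VERDICT =====
theorem detect_word_score_spec : Claim_equal_detect_word_score := by
  intro text _
  unfold Spec_detect_word_score detect_word_score detect_word_score_alt
  set ws := PySem.Str.split₀ (PySem.Str.lower text) with hws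
  have hget : ∀ v, ((ws.foldl (fun d w => d.insert w (d.getD w 0 + 1)) PySem.Dict.empty).getD v 0)
      = (ws.count v : Int) := by
    intro v
    rw [PySem.Dict.getD_foldl_insert_add_one]
    simp [PySem.Dict.empty, PySem.Dict.getD, PySem.Dict.get?]
  simp only [hget, pvPos_split, pvNeg_split]
  rw [pvA_fold,
    pvSigned_fold ((pvPositive.map (fun w => (w, (1 : Int)))) ++ (pvNegative.map (fun w => (w, (-1 : Int)))))
      (fun v => (ws.count v : Int)) 0]
  simp only [List.map_append, List.map_map, List.sum_append, Function.comp_def]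
  have h1 : (pvPositive.map (fun w => (1 : Int) * (ws.count w : Int))).sum
      = (ws.countP (fun w => pvPositive.contains w) : Int) := by
    rw [← pvSum_counts pvPositive pvPositive_nodup ws]
    simp only [one_mul]
  have h2 : (pvNegative.map (fun w => (-1 : Int) * (ws.count w : Int))).sum
      = -(ws.countP (fun w => pvNegative.contains w) : Int) := by
    rw [pvSum_neg, pvSum_counts pvNegative pvNegative_nodup ws]
  rw [h1, h2]; ring
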